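-- pv_equiv track=rewrite | github.com/mario-bermonti/wdiff | wanalysis.py | swap_y_for_y_check
-- ===== SOURCE A (Python) =====
-- def swap_y_for_y_check(word):
--     """Checks how many y's in the word word sound like /y/'s so they could be
--     swapped with ll's by mistake.
--     """
--
--     yCompliantCount = 0
--     yCount = word.count("y")
--     yPositions = list()
--     start = 0
--
--     while yCount > 0:
--         yPosition = word.find("y", start)
--         yPositions.append(yPosition)
--         start = yPosition + 1
--         yCount -= 1
--
--     # Improve
--     # Could be improve if 1 was taken from the
--     # count if length - 1 is in the list of
--     # position
--     for position in yPositions: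
--         if position != (len(word) - 1):
--             yCompliantCount += 1
--
--     return yCompliantCount
-- ===== SOURCE B (Python) =====
-- def swap_y_for_y_check(word):
--     """Checks how many y's in the word word sound like /y/'s so they could be
--     swapped with ll's by mistake.
--     """
--     return word.count("y") - (1 if word.endswith("y") else 0)
-- ===== Notes on version B (the rewrite author's own statement) =====
-- stated objective: simpler
-- what changed: Replaces A's find-loop that materialises every y position plus a second counting pass with the loopless closed form count('y') minus one when the word ends in 'y' (the only position that can equal len-1).
import Mathlib
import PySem

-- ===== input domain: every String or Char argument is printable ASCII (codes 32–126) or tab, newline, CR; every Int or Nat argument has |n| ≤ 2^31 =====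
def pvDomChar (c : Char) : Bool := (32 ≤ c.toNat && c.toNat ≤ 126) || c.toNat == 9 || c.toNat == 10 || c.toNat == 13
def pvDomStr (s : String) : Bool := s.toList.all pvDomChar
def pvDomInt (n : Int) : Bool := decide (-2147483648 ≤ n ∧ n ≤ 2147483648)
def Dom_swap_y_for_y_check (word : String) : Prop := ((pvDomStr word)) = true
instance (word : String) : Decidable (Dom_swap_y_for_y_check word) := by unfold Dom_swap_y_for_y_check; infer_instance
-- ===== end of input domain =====

-- B replaces A's position-collecting find-loop and second counting pass by the closed form
-- count('y') minus one when the word ends in 'y' (objective: simpler).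


-- ===== PORT A =====
-- the 'while yCount > 0' loop: repeatedly word.find("y", start), appending each position
def swapLoopA (cs : List Char) (yCount : Nat) (start : Int) (yPositions : List Int) : List Int :=
  match yCount with
  | 0 => yPositions
  | Nat.succ k =>
      let yPosition := PySem.Chars.findFrom cs ['y'] start none
      swapLoopA cs k (yPosition + 1) (yPositions ++ [yPosition])

def swap_y_for_y_check (word : String) : Int :=
  let yCount := PySem.Str.count word "y"
  let yPositions := swapLoopA word.toList yCount 0 []
  yPositions.foldl
    (fun yCompliantCount position =>
      if position ≠ (PySem.Str.len word) - 1 then yCompliantCount + 1 else yCompliantCount) 0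

-- ===== PORT B =====
def swap_y_for_y_check_alt (word : String) : Int :=
  (PySem.Str.count word "y" : Int) - (if PySem.Str.endswith word "y" then 1 else 0)

-- ===== PRECONDITION & SPEC =====
def Spec_swap_y_for_y_check (word : String) (out : Int) : Prop := out = swap_y_for_y_check_alt word
instance (word : String) (out : Int) : Decidable (Spec_swap_y_for_y_check word out) := by unfold Spec_swap_y_for_y_check; infer_instance

-- ===== CLAIM (what is proved, stated in full; the proofs are below) =====
def Claim_equal_swap_y_for_y_check : Prop := ∀ (word : String), Dom_swap_y_for_y_check word → Spec_swap_y_for_y_check word (swap_y_for_y_check word)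

-- ===== LEMMAS AND PROOFS =====

-- Python str.count for a single-character needle is List.count
theorem count_go_singleton (c : Char) : ∀ (fuel : Nat) (l : List Char) (acc : Nat),
    l.length ≤ fuel → PySem.Chars.count.go [c] fuel l acc = acc + l.count c := by
  intro fuel
  induction fuel with
  | zero =>
    intro l acc h
    cases l with
    | nil => simp [PySem.Chars.count.go]
    | cons x t => simp at h
  | succ n ih =>
    intro l acc h
    cases l with
    | nil => simp [PySem.Chars.count.go]
    | cons x t =>
      by_cases hx : c = x
      · subst hx
        have hgo : PySem.Chars.count.go [c] (n + 1) (c :: t) acc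
            = PySem.Chars.count.go [c] n t (acc + 1) := by
          simp [PySem.Chars.count.go, List.isPrefixOf]
        rw [hgo, ih t (acc + 1) (by simpa using Nat.le_of_succ_le_succ h)]
        simp
        omega
      · have hpre : ([c].isPrefixOf (x :: t)) = false := by
          simp [List.isPrefixOf]
          exact fun hc => hx (by simpa using hc)
        have hgo : PySem.Chars.count.go [c] (n + 1) (x :: t) acc
            = PySem.Chars.count.go [c] n t acc := by
          simp [PySem.Chars.count.go, hpre]
        rw [hgo, ih t acc (by simpa using Nat.le_of_succ_le_succ h)]
        have : (x == c) = false := by simp; exact fun hc => hx hc.symm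
        simp [List.count_cons, this]

theorem count_singleton (cs : List Char) (c : Char) :
    PySem.Chars.count cs [c] = cs.count c := by
  simp [PySem.Chars.count, count_go_singleton c cs.length cs 0 le_rfl]

-- no 'y' between s and s+d ⇒ counts of the two suffixes agree
theorem count_drop_of_no_y (cs : List Char) (c : Char) :
    ∀ (d s : Nat), s + d ≤ cs.length →
      (∀ i, s ≤ i → i < s + d → cs[i]? ≠ some c) →
      (cs.drop s).count c = (cs.drop (s + d)).count c := by
  intro d
  induction d with
  | zero => intro s _ _; rfl
  | succ m ih =>
    intro s hlen hno
    have hs : s < cs.length := by omega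
    have h1 : cs.drop s = cs[s] :: cs.drop (s + 1) := List.drop_eq_getElem_cons hs
    have hne : (cs[s] == c) = false := by
      have := hno s le_rfl (by omega)
      simp only [List.getElem?_eq_getElem hs, ne_eq, Option.some.injEq] at this
      simpa using this
    have harith : s + 1 + m = s + (m + 1) := by omega
    have h2 := ih (s + 1) (by omega) (fun i hi hi2 => hno i (by omega) (by omega))
    rw [harith] at h2
    rw [h1, List.count_cons, hne, h2]
    simp

-- a singleton prefix of a suffix pins down the character at that index
theorem prefix_singleton_drop (cs : List Char) (c : Char) (i : Nat) :
    [c] <+: cs.drop i ↔ i < cs.length ∧ cs[i]? = some c := by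
  constructor
  · rintro ⟨t, ht⟩
    have hi : i < cs.length := by
      by_contra hle
      have : cs.drop i = [] := List.drop_eq_nil_of_le (by omega)
      rw [this] at ht
      simp at ht
    have h1 : cs.drop i = cs[i] :: cs.drop (i + 1) := List.drop_eq_getElem_cons hi
    rw [h1] at ht
    have hch : c = cs[i] := by
      have h2 : (c :: t).head? = (cs[i] :: cs.drop (i + 1)).head? := congrArg List.head? ht
      rw [List.head?_cons, List.head?_cons] at h2
      exact Option.some.inj h2
    exact ⟨hi, by simp [List.getElem?_eq_getElem hi, hch]⟩
  · rintro ⟨hi, hc⟩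
    have h1 : cs.drop i = cs[i] :: cs.drop (i + 1) := List.drop_eq_getElem_cons hi
    have : cs[i] = c := by
      rw [List.getElem?_eq_getElem hi] at hc
      exact Option.some.inj hc
    exact ⟨cs.drop (i + 1), by rw [h1, this]; rfl⟩

-- the main loop invariant: the final counting pass over the collected positions,
-- expressed as count-so-far + remaining y's − (1 if the trailing y is still ahead)
theorem loop_foldl (cs : List Char) :
    ∀ (k : Nat) (s : Nat) (acc : List Int) (base : Int), s ≤ cs.length →
      k = (cs.drop s).count 'y' →
      (swapLoopA cs k (s : Int) acc).foldl
          (fun a p => if p ≠ (cs.length : Int) - 1 then a + 1 else a) base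
        = acc.foldl (fun a p => if p ≠ (cs.length : Int) - 1 then a + 1 else a) base
          + k - (if s < cs.length ∧ cs[cs.length - 1]? = some 'y' then 1 else 0) := by
  intro k
  induction k with
  | zero =>
    intro s acc base hs hk
    have hind : ¬ (s < cs.length ∧ cs[cs.length - 1]? = some 'y') := by
      rintro ⟨h1, h2⟩
      have hmem : 'y' ∈ cs.drop s := by
        have hlt : cs.length - 1 - s < (cs.drop s).length := by simp; omega
        have : (cs.drop s)[cs.length - 1 - s]'hlt = cs[cs.length - 1]'(by omega) := by
          rw [List.getElem_drop]
          congr 1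
          omega
        have hy : cs[cs.length - 1]'(by omega) = 'y' := by
          simpa [List.getElem?_eq_getElem (show cs.length - 1 < cs.length by omega)] using h2
        rw [← hy, ← this]
        exact List.getElem_mem hlt
      have : 0 < (cs.drop s).count 'y' := List.count_pos_iff.mpr hmem
      omega
    simp [swapLoopA, hind]
  | succ k ih =>
    intro s acc base hs hk
    -- the find succeeds: there is still a 'y' in the suffix
    have hmem : 'y' ∈ cs.drop s := by
      have : 0 < (cs.drop s).count 'y' := by omega
      exact List.count_pos_iff.mp this
    have hne : PySem.Chars.findFrom cs ['y'] (s : Int) none ≠ -1 := by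
      rw [ne_eq, PySem.Chars.findFrom_natCast_eq_neg_one_iff cs ['y'] s hs]
      simpa using (List.singleton_infix_iff 'y' (cs.drop s)).mpr hmem
    obtain ⟨hler, hprer, hmin⟩ := PySem.Chars.findFrom_natCast_spec cs ['y'] s hs hne
    set r := PySem.Chars.findFrom cs ['y'] (s : Int) none with hr
    have hr0 : 0 ≤ r := le_trans (by positivity) hler
    set t := r.toNat with ht
    have hrt : r = (t : Int) := (Int.toNat_of_nonneg hr0).symm
    have hst : s ≤ t := by omega
    obtain ⟨htlen, hct⟩ := (prefix_singleton_drop cs 'y' t).mp hprer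
    -- no 'y' strictly between s and t
    have hno : ∀ i, s ≤ i → i < t → cs[i]? ≠ some 'y' := by
      intro i h1 h2 hc
      exact hmin i h1 h2 ((prefix_singleton_drop cs 'y' i).mpr ⟨by omega, hc⟩)
    -- count bookkeeping: k y's remain beyond t
    have hcount : (cs.drop s).count 'y' = (cs.drop t).count 'y' := by
      have := count_drop_of_no_y cs 'y' (t - s) s (by omega)
        (fun i hi1 hi2 => hno i hi1 (by omega))
      simpa [Nat.add_sub_cancel' hst] using this
    have hdt : cs.drop t = 'y' :: cs.drop (t + 1) := by
      have h1 : cs.drop t = cs[t] :: cs.drop (t + 1) := List.drop_eq_getElem_cons htlen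
      have : cs[t] = 'y' := by simpa [List.getElem?_eq_getElem htlen] using hct
      rw [h1, this]
    have hk' : k = (cs.drop (t + 1)).count 'y' := by
      rw [hcount, hdt] at hk
      simpa using hk
    -- unfold one loop iteration
    have hstep : swapLoopA cs (k + 1) (s : Int) acc
        = swapLoopA cs k ((t + 1 : Nat) : Int) (acc ++ [r]) := by
      simp only [swapLoopA, ← hr, hrt]
      push_cast
      rfl
    rw [hstep, ih (t + 1) (acc ++ [r]) base (by omega) hk']
    rw [List.foldl_append]
    simp only [List.foldl_cons, List.foldl_nil]
    by_cases hlast : t = cs.length - 1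
    · -- the found y is the trailing character
      have hry : cs[cs.length - 1]? = some 'y' := by rw [← hlast]; exact hct
      have hreq : ¬ (r ≠ (cs.length : Int) - 1) := by
        simp only [ne_eq, not_not, hrt, hlast]
        omega
      have hc1 : ¬ (t + 1 < cs.length ∧ cs[cs.length - 1]? = some 'y') := by
        rintro ⟨h1, _⟩; omega
      have hc2 : (s < cs.length ∧ cs[cs.length - 1]? = some 'y') := ⟨by omega, hry⟩
      rw [if_neg hreq, if_neg hc1, if_pos hc2]
      push_cast
      omega
    · -- the found y is not at the last index
      have hreq : r ≠ (cs.length : Int) - 1 := by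
        rw [hrt]
        intro hcontra
        apply hlast
        omega
      have hiff : (t + 1 < cs.length ∧ cs[cs.length - 1]? = some 'y')
          ↔ (s < cs.length ∧ cs[cs.length - 1]? = some 'y') := by
        constructor
        · rintro ⟨_, h2⟩; exact ⟨by omega, h2⟩
        · rintro ⟨_, h2⟩; exact ⟨by omega, h2⟩
      rw [if_pos hreq]
      by_cases hcond : s < cs.length ∧ cs[cs.length - 1]? = some 'y'
      · rw [if_pos (hiff.mpr hcond), if_pos hcond]; omega
      · rw [if_neg (fun h => hcond (hiff.mp h)), if_neg hcond]; omega

-- word.endswith(c) in terms of the character at the last index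
theorem endswith_singleton (l : List Char) (c : Char) :
    PySem.Chars.endswith l [c] = true ↔ 0 < l.length ∧ l[l.length - 1]? = some c := by
  rw [PySem.Chars.endswith_iff]
  constructor
  · rintro ⟨t, ht⟩
    have hlast : l.getLast? = some c := by
      rw [List.getLast?_eq_some_iff]
      exact ⟨t, ht.symm⟩
    have hlen : 0 < l.length := by
      cases l with
      | nil => simp at hlast
      | cons x xs => simp
    exact ⟨hlen, by rw [← List.getLast?_eq_getElem?]; exact hlast⟩
  · rintro ⟨hlen, hc⟩
    have hlast : l.getLast? = some c := by rw [List.getLast?_eq_getElem?]; exact hc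
    obtain ⟨t, ht⟩ := List.getLast?_eq_some_iff.mp hlast
    exact ⟨t, ht.symm⟩

-- ===== VERDICT (by name: the statement is the Claim_ definition above) =====
theorem swap_y_for_y_check_spec : Claim_equal_swap_y_for_y_check := by
  intro word _
  unfold Spec_swap_y_for_y_check swap_y_for_y_check swap_y_for_y_check_alt
  have hy : ("y" : String).toList = ['y'] := by decide
  have hcnt : PySem.Str.count word "y" = word.toList.count 'y' := by
    rw [PySem.Str.count_eq, hy, count_singleton]
  have hmain := loop_foldl word.toList (word.toList.count 'y') 0 [] 0 (by omega)
    (by simp)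
  simp only [Nat.cast_zero] at hmain
  have hend : (PySem.Str.endswith word "y" = true)
      ↔ (0 < word.toList.length ∧ word.toList[word.toList.length - 1]? = some 'y') := by
    rw [PySem.Str.endswith_eq, hy]
    exact endswith_singleton word.toList 'y'
  simp only [hcnt, PySem.Str.len_eq]
  by_cases hcond : 0 < word.toList.length ∧ word.toList[word.toList.length - 1]? = some 'y'
  · rw [if_pos hcond] at hmain
    rw [if_pos (hend.mpr hcond)]
    exact hmain.trans (by simp)
  · rw [if_neg hcond] at hmain
    rw [if_neg (fun h => hcond (hend.mp h))]
    exact hmain.trans (by simp)
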